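-- pv_equiv track=rewrite | github.com/honggucci/hattz_empire | scripts/embed_session_backup.py | split_content_by_tokens
-- ===== SOURCE A (Python) =====
-- def split_content_by_tokens(content: str, max_tokens: int = 6000) -> list[str]:
--     """
--     컨텐츠를 토큰 제한에 맞게 분할
--     간단한 휴리스틱: 1 토큰 ≈ 4 chars (영어 기준), 한글은 ≈ 2 chars
--     """
--     max_chars = max_tokens * 2  # 보수적으로 추정
--     chunks = []
--
--     # "## [" 패턴으로 메시지 단위 분할
--     lines = content.split('\n')
--     current_chunk = []
--     current_size = 0
--
--     for line in lines:
--         line_size = len(line) + 1  # +1 for newline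
--
--         # 새 메시지 시작 && 현재 청크가 max를 넘으면 저장
--         if line.startswith("## [") and current_size + line_size > max_chars:
--             if current_chunk:
--                 chunks.append('\n'.join(current_chunk))
--                 current_chunk = []
--                 current_size = 0
--
--         current_chunk.append(line)
--         current_size += line_size
--
--     # 마지막 청크
--     if current_chunk:
--         chunks.append('\n'.join(current_chunk))
--
--     return chunks
-- ===== SOURCE B (Python) =====
-- def split_content_by_tokens(content: str, max_tokens: int = 6000) -> list[str]:
--     max_chars = max_tokens * 2
--     # Pass 1: group lines into message segments, each "## [" marker starting a
--     # new segment; the (possibly empty) leading segment holds lines before it.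
--     segments = [[]]
--     for line in content.split('\n'):
--         if line.startswith("## ["):
--             segments.append([line])
--         else:
--             segments[-1].append(line)
--     # Pass 2: pack whole segments into chunks; flush when the incoming
--     # segment's first line would push the current chunk over the limit.
--     chunks = []
--     current = []
--     size = 0
--     for seg in segments:
--         if seg and current and size + len(seg[0]) + 1 > max_chars:
--             chunks.append('\n'.join(current))
--             current = []
--             size = 0
--         current.extend(seg)
--         size += sum(len(l) + 1 for l in seg)
--     if current:
--         chunks.append('\n'.join(current))
--     return chunks
-- ===== Notes on version B (the rewrite author's own statement) =====
-- stated objective: alternative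
-- what changed: A's single stateful line loop is replaced by two passes: first group the lines into '## ['-headed message segments, then pack whole segments into chunks, flushing when the incoming segment's first line would exceed the limit.
import Mathlib
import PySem

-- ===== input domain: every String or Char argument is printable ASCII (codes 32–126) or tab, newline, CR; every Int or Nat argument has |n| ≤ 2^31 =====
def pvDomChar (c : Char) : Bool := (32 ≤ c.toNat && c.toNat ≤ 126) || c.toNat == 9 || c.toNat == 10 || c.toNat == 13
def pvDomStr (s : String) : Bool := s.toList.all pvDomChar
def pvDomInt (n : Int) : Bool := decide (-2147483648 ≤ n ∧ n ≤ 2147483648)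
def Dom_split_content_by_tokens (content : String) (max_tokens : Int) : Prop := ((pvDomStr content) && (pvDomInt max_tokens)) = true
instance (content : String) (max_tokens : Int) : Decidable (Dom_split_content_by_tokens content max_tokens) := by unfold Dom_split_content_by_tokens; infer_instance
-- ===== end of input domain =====

-- B replaces A's single line-by-line loop by two passes (group the lines into "## ["-headed
-- message segments, then pack whole segments into chunks): alternative decomposition, same cost.

-- ===== PORT A =====
-- A's for-loop over the lines, state = (chunks, current_chunk, current_size)
def pvALoop (mc : Int) : List String → List String → List String → Int → List String
  | [], chunks, chunk, _ =>
      if chunk ≠ [] then chunks ++ [PySem.Str.join "\n" chunk] else chunks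
  | l :: ls, chunks, chunk, size =>
      let lsz := PySem.Str.len l + 1
      if PySem.Str.startswith l "## [" = true ∧ size + lsz > mc then
        if chunk ≠ [] then
          pvALoop mc ls (chunks ++ [PySem.Str.join "\n" chunk]) ([] ++ [l]) (0 + lsz)
        else
          pvALoop mc ls chunks (chunk ++ [l]) (size + lsz)
      else
        pvALoop mc ls chunks (chunk ++ [l]) (size + lsz)

def split_content_by_tokens (content : String) (max_tokens : Int) : List String :=
  let max_chars := max_tokens * 2
  let lines := (PySem.Str.split? content "\n").getD []   -- sep "\n" ≠ "", so split? is some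
  pvALoop max_chars lines [] [] 0

-- ===== PORT B =====
-- pass 1 helper: segments[-1].append(line)
def pvAppLast : List (List String) → String → List (List String)
  | [], l => [[l]]
  | [seg], l => [seg ++ [l]]
  | seg :: s2 :: rest, l => seg :: pvAppLast (s2 :: rest) l

def pvSegs (lines : List String) : List (List String) :=
  lines.foldl (fun segs l =>
    if PySem.Str.startswith l "## [" = true then segs ++ [[l]] else pvAppLast segs l) [[]]

def pvSegSize (seg : List String) : Int :=
  (seg.map (fun l => PySem.Str.len l + 1)).sum

-- pass 2: pack segments into chunks, state = (chunks, current, size)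
def pvBLoop (mc : Int) : List (List String) → List String → List String → Int → List String
  | [], chunks, cur, _ =>
      if cur ≠ [] then chunks ++ [PySem.Str.join "\n" cur] else chunks
  | seg :: rest, chunks, cur, size =>
      if seg ≠ [] ∧ cur ≠ [] ∧ size + (PySem.Str.len (seg.headD "") + 1) > mc then
        pvBLoop mc rest (chunks ++ [PySem.Str.join "\n" cur]) ([] ++ seg) (0 + pvSegSize seg)
      else
        pvBLoop mc rest chunks (cur ++ seg) (size + pvSegSize seg)

def split_content_by_tokens_alt (content : String) (max_tokens : Int) : List String :=
  let max_chars := max_tokens * 2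
  pvBLoop max_chars (pvSegs ((PySem.Str.split? content "\n").getD [])) [] [] 0

-- ===== PRECONDITION & SPEC =====
def Spec_split_content_by_tokens (content : String) (max_tokens : Int) (out : List String) : Prop := out = split_content_by_tokens_alt content max_tokens
instance (content : String) (max_tokens : Int) (out : List String) : Decidable (Spec_split_content_by_tokens content max_tokens out) := by unfold Spec_split_content_by_tokens; infer_instance

-- ===== CLAIM (what is proved, stated in full; the proofs are below) =====
def Claim_equal_split_content_by_tokens : Prop := ∀ (content : String) (max_tokens : Int), Dom_split_content_by_tokens content max_tokens → Spec_split_content_by_tokens content max_tokens (split_content_by_tokens content max_tokens)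

-- ===== LEMMAS AND PROOFS =====

-- a marker-headed segment: first line a "## [" marker, the rest not
def pvMarkSeg (seg : List String) : Prop :=
  ∃ m ns, seg = m :: ns ∧ PySem.Str.startswith m "## [" = true ∧
    ∀ l ∈ ns, PySem.Str.startswith l "## [" = false

-- invariant of pass 1's accumulator: a leading all-non-marker segment, then marker-headed segments
def pvShape (segs : List (List String)) : Prop :=
  ∃ f r, segs = f :: r ∧ (∀ l ∈ f, PySem.Str.startswith l "## [" = false) ∧
    ∀ seg ∈ r, pvMarkSeg seg

theorem pvSegSize_cons (m : String) (ns : List String) :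
    pvSegSize (m :: ns) = PySem.Str.len m + 1 + pvSegSize ns := by
  simp [pvSegSize]

theorem pvAppLast_flatten (l : String) : ∀ segs, segs ≠ [] →
    (pvAppLast segs l).flatten = segs.flatten ++ [l] := by
  intro segs
  induction segs with
  | nil => simp
  | cons seg rest ih =>
    intro _
    cases rest with
    | nil => simp [pvAppLast]
    | cons s2 r2 => simp [pvAppLast, ih (by simp)]

theorem pvAppLast_markSegs (l : String) (hl : PySem.Str.startswith l "## [" = false) :
    ∀ r, r ≠ [] → (∀ seg ∈ r, pvMarkSeg seg) → ∀ seg ∈ pvAppLast r l, pvMarkSeg seg := by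
  intro r
  induction r with
  | nil => intro h; exact absurd rfl h
  | cons s rest ih =>
    intro _ hall seg hseg
    cases rest with
    | nil =>
      simp [pvAppLast] at hseg
      subst hseg
      obtain ⟨m, ns, hs, hm, hns⟩ := hall s (by simp)
      exact ⟨m, ns ++ [l], by simp [hs], hm, by
        intro x hx
        rcases List.mem_append.mp hx with h | h
        · exact hns x h
        · simp at h; subst h; exact hl⟩
    | cons s2 r2 =>
      simp only [pvAppLast] at hseg
      rcases List.mem_cons.mp hseg with h | h
      · subst h; exact hall seg (by simp)
      · exact ih (by simp) (fun x hx => hall x (by simp [hx])) seg h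

theorem pvAppLast_shape (l : String) (hl : PySem.Str.startswith l "## [" = false) :
    ∀ segs, pvShape segs → pvShape (pvAppLast segs l) := by
  rintro segs ⟨f, r, rfl, hf, hr⟩
  cases r with
  | nil =>
    refine ⟨f ++ [l], [], by simp [pvAppLast], ?_, by simp⟩
    intro x hx
    rcases List.mem_append.mp hx with h | h
    · exact hf x h
    · simp at h; subst h; exact hl
  | cons s2 r2 =>
    exact ⟨f, pvAppLast (s2 :: r2) l, by simp [pvAppLast], hf,
      pvAppLast_markSegs l hl _ (by simp) hr⟩

theorem pvShape_ne_nil {segs : List (List String)} (h : pvShape segs) : segs ≠ [] := by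
  obtain ⟨f, r, rfl, -, -⟩ := h; simp

theorem pvSegs_spec (lines : List String) :
    pvShape (pvSegs lines) ∧ (pvSegs lines).flatten = lines := by
  unfold pvSegs
  suffices h : ∀ segs, pvShape segs →
      pvShape (lines.foldl (fun segs l =>
        if PySem.Str.startswith l "## [" = true then segs ++ [[l]] else pvAppLast segs l) segs) ∧
      (lines.foldl (fun segs l =>
        if PySem.Str.startswith l "## [" = true then segs ++ [[l]] else pvAppLast segs l) segs).flatten
        = segs.flatten ++ lines by
    have hsh0 : pvShape [[]] := ⟨[], [], rfl, by simp, by simp⟩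
    have := h [[]] hsh0
    exact ⟨this.1, by simpa using this.2⟩
  induction lines with
  | nil =>
    intro segs hsh
    simp only [List.foldl_nil]
    exact ⟨hsh, by simp⟩
  | cons l ls ih =>
    intro segs hsh
    rw [List.foldl_cons]
    by_cases hm : PySem.Str.startswith l "## [" = true
    · rw [if_pos hm]
      have hsh' : pvShape (segs ++ [[l]]) := by
        obtain ⟨f, r, rfl, hf, hr⟩ := hsh
        refine ⟨f, r ++ [[l]], by simp, hf, ?_⟩
        intro seg hseg
        rcases List.mem_append.mp hseg with h | h
        · exact hr seg h
        · simp at h; subst h; exact ⟨l, [], rfl, hm, by simp⟩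
      obtain ⟨h1, h2⟩ := ih _ hsh'
      exact ⟨h1, by rw [h2]; simp⟩
    · rw [if_neg hm]
      have hl : PySem.Str.startswith l "## [" = false := by
        simpa using hm
      have hsh' := pvAppLast_shape l hl segs hsh
      have hfl := pvAppLast_flatten l segs (pvShape_ne_nil hsh)
      obtain ⟨h1, h2⟩ := ih _ hsh'
      exact ⟨h1, by rw [h2, hfl]; simp⟩

-- A on a run of non-marker lines just accumulates them
theorem pvALoop_nonmark (mc : Int) (ns : List String)
    (h : ∀ l ∈ ns, PySem.Str.startswith l "## [" = false) :
    ∀ rest chunks chunk size,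
    pvALoop mc (ns ++ rest) chunks chunk size
      = pvALoop mc rest chunks (chunk ++ ns) (size + pvSegSize ns) := by
  induction ns with
  | nil => intro rest chunks chunk size; simp [pvSegSize]
  | cons n ns ih =>
    intro rest chunks chunk size
    have hn : PySem.Str.startswith n "## [" = false := h n (by simp)
    simp only [List.cons_append, pvALoop]
    rw [if_neg (by simp only [hn]; simp)]
    rw [ih (fun l hl => h l (by simp [hl]))]
    rw [pvSegSize_cons]
    simp only [List.append_assoc, List.singleton_append]
    ring_nf

-- A over the flattening of marker-headed segments = B over those segments
theorem pvALoop_eq_pvBLoop (mc : Int) : ∀ (segs : List (List String)),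
    (∀ seg ∈ segs, pvMarkSeg seg) →
    ∀ chunks chunk size,
    pvALoop mc segs.flatten chunks chunk size = pvBLoop mc segs chunks chunk size := by
  intro segs
  induction segs with
  | nil => intro _ chunks chunk size; simp [pvALoop, pvBLoop]
  | cons seg rest ih =>
    intro hall chunks chunk size
    obtain ⟨m, ns, hseg, hm, hns⟩ := hall seg (by simp)
    subst hseg
    have hrest : ∀ s ∈ rest, pvMarkSeg s := fun s hs => hall s (by simp [hs])
    simp only [List.flatten_cons, List.cons_append, pvALoop, pvBLoop]
    by_cases hov : size + (PySem.Str.len m + 1) > mc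
    · rw [if_pos ⟨hm, hov⟩]
      by_cases hc : chunk ≠ []
      · rw [if_pos hc, if_pos ⟨by simp, hc, by simpa using hov⟩]
        rw [pvALoop_nonmark mc ns hns, ih hrest]
        rw [pvSegSize_cons]
        simp only [List.nil_append, List.singleton_append]
        ring_nf
      · rw [if_neg hc]
        rw [if_neg (by simp at hc; simp [hc])]
        rw [pvALoop_nonmark mc ns hns, ih hrest]
        rw [pvSegSize_cons]
        simp only [List.append_assoc, List.singleton_append]
        ring_nf
    · rw [if_neg (by intro ⟨_, h⟩; exact hov h)]
      rw [if_neg (by intro ⟨_, _, h⟩; exact hov (by simpa using h))]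
      rw [pvALoop_nonmark mc ns hns, ih hrest]
      rw [pvSegSize_cons]
      simp only [List.append_assoc, List.singleton_append]
      ring_nf

-- ===== VERDICT (by name: the statement is the Claim_ definition above) =====
theorem split_content_by_tokens_spec : Claim_equal_split_content_by_tokens := by
  intro content max_tokens _
  show split_content_by_tokens content max_tokens = split_content_by_tokens_alt content max_tokens
  show pvALoop (max_tokens * 2) ((PySem.Str.split? content "\n").getD []) [] [] 0
      = pvBLoop (max_tokens * 2) (pvSegs ((PySem.Str.split? content "\n").getD [])) [] [] 0
  obtain ⟨hsh, hfl⟩ := pvSegs_spec ((PySem.Str.split? content "\n").getD [])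
  obtain ⟨f, r, hsegs, hf, hr⟩ := hsh
  rw [hsegs] at hfl
  rw [hsegs, ← hfl]
  have hstep : pvBLoop (max_tokens * 2) (f :: r) [] [] 0
      = pvBLoop (max_tokens * 2) r [] ([] ++ f) (0 + pvSegSize f) := by
    simp only [pvBLoop]
    rw [if_neg (by rintro ⟨-, h, -⟩; exact h rfl)]
  rw [hstep]
  simp only [List.flatten_cons]
  rw [pvALoop_nonmark _ f hf, pvALoop_eq_pvBLoop _ r hr]
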